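-- pv_equiv track=rewrite | github.com/DeepPSP/torch_ecg | benchmarks/train_mtl_cinc2022/helper_code.py | get_sex
-- ===== SOURCE A (Python) =====
-- def get_sex(data):
--     sex = None
--     for line in data.split("\n"):
--         if line.startswith("#Sex:"):
--             try:
--                 sex = line.split(": ")[1].strip()
--             except Exception:
--                 pass
--     return sex
-- ===== SOURCE B (Python) =====
-- def get_sex(data):
--     for line in reversed(data.split("\n")):
--         if line.startswith("#Sex:"):
--             parts = line.split(": ")
--             if len(parts) > 1:
--                 return parts[1].strip()
--     return None
-- ===== Notes on version B (the rewrite author's own statement) =====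
-- stated objective: simpler
-- what changed: Replaces the full forward scan that keeps overwriting an accumulator with a reverse scan that returns the first parseable '#Sex:' line immediately (no accumulator, no try/except).
import Mathlib
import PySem

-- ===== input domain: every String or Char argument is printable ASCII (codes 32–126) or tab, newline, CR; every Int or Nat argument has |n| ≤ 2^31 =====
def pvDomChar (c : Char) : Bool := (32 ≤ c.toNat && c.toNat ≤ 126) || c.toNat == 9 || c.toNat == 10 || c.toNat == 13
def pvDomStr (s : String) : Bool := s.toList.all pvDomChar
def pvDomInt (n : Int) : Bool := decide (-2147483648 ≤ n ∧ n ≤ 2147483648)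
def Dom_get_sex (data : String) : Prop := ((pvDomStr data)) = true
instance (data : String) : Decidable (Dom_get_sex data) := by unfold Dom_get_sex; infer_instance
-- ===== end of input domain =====

-- B replaces A's full forward scan with an overwritten accumulator by a reverse scan
-- returning the first parseable '#Sex:' line (simpler: no accumulator, no try/except).
-- Both ports work on the code-point lists via PySem.Chars (exact; Str is a thin wrapper).

-- ===== PORT A =====
-- A: forward loop over lines, overwriting `sex` on each line that starts with "#Sex:"
-- and has a second ": "-piece (the IndexError of [1] is caught → keep previous value).
def get_sex (data : String) : Option String :=
  (PySem.Chars.splitOn data.toList ['\n']).foldl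
    (fun sex line =>
      if PySem.Chars.startswith line ['#','S','e','x',':'] then
        match (PySem.Chars.splitOn line [':',' '])[1]? with
        | some s => some (String.mk (PySem.Chars.strip s))   -- sex = line.split(": ")[1].strip()
        | none => sex                                        -- except Exception: pass
      else sex)
    none

-- ===== PORT B =====
-- B's loop: scan the reversed line list, early-return on the first parseable line.
def getSexRev : List (List Char) → Option String
  | [] => none
  | line :: rest =>
    if PySem.Chars.startswith line ['#','S','e','x',':'] then
      match (PySem.Chars.splitOn line [':',' '])[1]? with
      | some s => some (String.mk (PySem.Chars.strip s))
      | none => getSexRev rest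
    else getSexRev rest

def get_sex_alt (data : String) : Option String :=
  getSexRev (PySem.Chars.splitOn data.toList ['\n']).reverse

-- ===== PRECONDITION & SPEC =====
def Spec_get_sex (data : String) (out : Option String) : Prop := out = get_sex_alt data
instance (data : String) (out : Option String) : Decidable (Spec_get_sex data out) := by unfold Spec_get_sex; infer_instance

-- ===== CLAIM (what is proved, stated in full; the proofs are below) =====
def Claim_equal_get_sex : Prop := ∀ (data : String), Dom_get_sex data → Spec_get_sex data (get_sex data)

-- ===== LEMMAS AND PROOFS =====

theorem getSexRev_append (a b : List (List Char)) :
    getSexRev (a ++ b) = (getSexRev a).orElse (fun _ => getSexRev b) := by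
  induction a with
  | nil => rfl
  | cons x xs ih =>
    simp only [List.cons_append, getSexRev]
    split_ifs with h
    · cases hm : (PySem.Chars.splitOn x [':',' '])[1]? <;> simp [ih, Option.orElse]
    · exact ih

theorem foldl_eq_rev (l : List (List Char)) (init : Option String) :
    l.foldl
      (fun sex line =>
        if PySem.Chars.startswith line ['#','S','e','x',':'] then
          match (PySem.Chars.splitOn line [':',' '])[1]? with
          | some s => some (String.mk (PySem.Chars.strip s))
          | none => sex
        else sex)
      init
    = (getSexRev l.reverse).orElse (fun _ => init) := by
  induction l generalizing init with
  | nil => rfl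
  | cons x xs ih =>
    simp only [List.foldl_cons, List.reverse_cons, getSexRev_append, ih]
    cases hr : getSexRev xs.reverse with
    | some v => simp [Option.orElse]
    | none =>
      simp only [Option.orElse, getSexRev]
      split_ifs with h
      · cases hm : (PySem.Chars.splitOn x [':',' '])[1]? <;> rfl
      · rfl

-- ===== VERDICT (by name: the statement is the Claim_ definition above) =====
theorem get_sex_spec : Claim_equal_get_sex := by
  intro data _
  unfold Spec_get_sex get_sex get_sex_alt
  rw [foldl_eq_rev]
  cases hr : getSexRev (PySem.Chars.splitOn data.toList ['\n']).reverse <;> rfl
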